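-- pv_equiv track=rewrite | github.com/ShotaYmzk/mahjong_ai | src/utils/shanten.py | format_tiles_for_display
-- ===== SOURCE A (Python) =====
-- from typing import List, Dict, Tuple, Optional
--
-- def format_tiles_for_display(tile_indices: List[int]) -> str:
--     """
--     牌のインデックスのリストを表示用の文字列に変換します。
--
--     Args:
--         tile_indices: 牌インデックスのリスト (0-33)
--
--     Returns:
--         表示用文字列 (例: "123m456p")
--     """
--     if not tile_indices:
--         return ""
--
--     man = sorted([i for i in tile_indices if 0 <= i <= 8])
--     pin = sorted([i for i in tile_indices if 9 <= i <= 17])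
--     sou = sorted([i for i in tile_indices if 18 <= i <= 26])
--     honors = sorted([i for i in tile_indices if 27 <= i <= 33])
--
--     result_str = ""
--     if man:
--         # 赤5萬は0mと表示
--         result_str += "".join(['0' if t == 4 else str(t + 1) for t in man]) + "m"
--     if pin:
--         # 赤5筒は0pと表示
--         result_str += "".join(['0' if t == 13 else str(t - 9 + 1) for t in pin]) + "p"
--     if sou:
--         # 赤5索は0sと表示
--         result_str += "".join(['0' if t == 22 else str(t - 18 + 1) for t in sou]) + "s"
--     if honors:
--         result_str += "".join([str(t - 27 + 1) for t in honors]) + "z"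
--
--     return result_str
-- ===== SOURCE B (Python) =====
-- def format_tiles_for_display(tile_indices):
--     tiles = sorted(t for t in tile_indices if 0 <= t <= 33)
--     out = ""
--     prev = -1
--     for t in tiles:
--         band = min(t // 9, 3)
--         if band != prev:
--             if prev >= 0:
--                 out += "mpsz"[prev]
--             prev = band
--         out += "0" if t in (4, 13, 22) else str(t % 9 + 1)
--     if prev >= 0:
--         out += "mpsz"[prev]
--     return out
-- ===== Notes on version B (the rewrite author's own statement) =====
-- stated objective: faster
-- what changed: Replaces A's four separate filter+sort passes and four per-suit join blocks by one combined filter, a single sort, and one band-tracking pass that emits digits and a suit letter at each band boundary.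
import Mathlib
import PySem

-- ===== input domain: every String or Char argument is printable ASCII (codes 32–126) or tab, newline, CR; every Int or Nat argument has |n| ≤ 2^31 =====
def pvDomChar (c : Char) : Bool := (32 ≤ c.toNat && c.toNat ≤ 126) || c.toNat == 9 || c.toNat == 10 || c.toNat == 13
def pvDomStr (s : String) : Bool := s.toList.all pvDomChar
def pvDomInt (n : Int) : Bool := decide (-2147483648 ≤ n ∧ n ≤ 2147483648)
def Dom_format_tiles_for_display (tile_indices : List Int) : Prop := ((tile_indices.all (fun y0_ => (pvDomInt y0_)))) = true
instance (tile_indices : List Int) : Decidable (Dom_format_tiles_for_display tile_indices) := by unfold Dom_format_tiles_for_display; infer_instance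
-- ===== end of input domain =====

-- B replaces A's four filter+sort passes by one filter+sort and a single band-tracking pass (alternative decomposition, same cost class).

-- ===== PORT A =====
def format_tiles_for_display (tile_indices : List Int) : String :=
  if tile_indices = [] then ""
  else
    let man := PySem.List.sorted (tile_indices.filter (fun i => decide (0 ≤ i) && decide (i ≤ 8))) (fun x => x) false
    let pin := PySem.List.sorted (tile_indices.filter (fun i => decide (9 ≤ i) && decide (i ≤ 17))) (fun x => x) false
    let sou := PySem.List.sorted (tile_indices.filter (fun i => decide (18 ≤ i) && decide (i ≤ 26))) (fun x => x) false
    let honors := PySem.List.sorted (tile_indices.filter (fun i => decide (27 ≤ i) && decide (i ≤ 33))) (fun x => x) false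
    let result_str := ""
    let result_str := if man ≠ [] then result_str ++ PySem.Str.join "" (man.map (fun t => if t = 4 then "0" else PySem.Int.toStr (t + 1))) ++ "m" else result_str
    let result_str := if pin ≠ [] then result_str ++ PySem.Str.join "" (pin.map (fun t => if t = 13 then "0" else PySem.Int.toStr (t - 9 + 1))) ++ "p" else result_str
    let result_str := if sou ≠ [] then result_str ++ PySem.Str.join "" (sou.map (fun t => if t = 22 then "0" else PySem.Int.toStr (t - 18 + 1))) ++ "s" else result_str
    let result_str := if honors ≠ [] then result_str ++ PySem.Str.join "" (honors.map (fun t => PySem.Int.toStr (t - 27 + 1))) ++ "z" else result_str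
    result_str

-- ===== PORT B =====
-- '0' for a red five, else (t % 9) + 1 as a string
def pvDigit (t : Int) : String :=
  if t = 4 ∨ t = 13 ∨ t = 22 then "0" else PySem.Int.toStr (PySem.Int.mod t 9 + 1)

-- "mpsz"[b]; every call site has 0 ≤ b ≤ 3, so the none branch is unreachable (exact)
def pvLetter (b : Int) : String :=
  match PySem.Str.pyGet? "mpsz" b with
  | some c => String.ofList [c]
  | none => ""

-- one iteration of B's loop: state = (out, prev band)
def pvStep (s : String × Int) (t : Int) : String × Int :=
  let band := min (PySem.Int.floordiv t 9) 3
  let s' := if band ≠ s.2 then ((if 0 ≤ s.2 then s.1 ++ pvLetter s.2 else s.1), band) else s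
  (s'.1 ++ pvDigit t, s'.2)

def format_tiles_for_display_alt (tile_indices : List Int) : String :=
  let tiles := PySem.List.sorted (tile_indices.filter (fun t => decide (0 ≤ t) && decide (t ≤ 33))) (fun x => x) false
  let fin := tiles.foldl pvStep ("", -1)
  if 0 ≤ fin.2 then fin.1 ++ pvLetter fin.2 else fin.1

-- ===== PRECONDITION & SPEC =====
def Spec_format_tiles_for_display (tile_indices : List Int) (out : String) : Prop := out = format_tiles_for_display_alt tile_indices
instance (tile_indices : List Int) (out : String) : Decidable (Spec_format_tiles_for_display tile_indices out) := by unfold Spec_format_tiles_for_display; infer_instance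

-- ===== CLAIM (what is proved, stated in full; the proofs are below) =====
def Claim_equal_format_tiles_for_display : Prop := ∀ (tile_indices : List Int), Dom_format_tiles_for_display tile_indices → Spec_format_tiles_for_display tile_indices (format_tiles_for_display tile_indices)

-- ===== LEMMAS AND PROOFS =====

theorem pv_intercalate_nil (l : List (List Char)) : ([] : List Char).intercalate l = l.flatten := by
  induction l with
  | nil => simp [List.intercalate]
  | cons a t ih => cases t <;> simp_all [List.intercalate, List.intersperse]

theorem pvJoin_cons (s : String) (l : List String) :
    PySem.Str.join "" (s :: l) = s ++ PySem.Str.join "" l := by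
  simp [PySem.Str.join, PySem.Chars.join, pv_intercalate_nil]

theorem pvJoin_nil : PySem.Str.join "" ([] : List String) = "" := by
  simp [PySem.Str.join, PySem.Chars.join, pv_intercalate_nil]

-- abbreviation used only in the proofs: the digits B emits for a run of tiles
def pvDigits (l : List Int) : String := PySem.Str.join "" (l.map pvDigit)

def pvClose (p : Int) : String := if 0 ≤ p then pvLetter p else ""

theorem pvRunSame (b : Int) : ∀ (l : List Int) (acc : String),
    (∀ t ∈ l, min (PySem.Int.floordiv t 9) 3 = b) →
    l.foldl pvStep (acc, b) = (acc ++ pvDigits l, b) := by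
  intro l
  induction l with
  | nil => intro acc _; simp [pvDigits, pvJoin_nil]
  | cons t rest ih =>
    intro acc h
    have hb : min (PySem.Int.floordiv t 9) 3 = b := h t (by simp)
    have hstep : pvStep (acc, b) t = (acc ++ pvDigit t, b) := by
      simp only [pvStep]
      rw [hb]
      simp
    rw [List.foldl_cons, hstep, ih _ (fun x hx => h x (by simp [hx]))]
    simp [pvDigits, pvJoin_cons, String.append_assoc]

theorem pvRunPart (l : List Int) (b prev : Int) (acc : String)
    (hb : ∀ t ∈ l, min (PySem.Int.floordiv t 9) 3 = b) (hprev : prev < b) :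
    l.foldl pvStep (acc, prev) =
      (acc ++ (if l = [] then "" else pvClose prev ++ pvDigits l),
       if l = [] then prev else b) := by
  cases l with
  | nil => simp
  | cons t rest =>
    have hb0 : min (PySem.Int.floordiv t 9) 3 = b := hb t (by simp)
    have hne : ¬ (b = prev) := by omega
    have hstep : pvStep (acc, prev) t = ((acc ++ pvClose prev) ++ pvDigit t, b) := by
      simp only [pvStep]
      rw [hb0]
      by_cases hp : 0 ≤ prev <;> simp [hne, pvClose, hp, String.append_empty]
    rw [List.foldl_cons, hstep, pvRunSame b rest _ (fun x hx => hb x (by simp [hx]))]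
    simp [pvDigits, pvJoin_cons, String.append_assoc]

theorem pvFilterOrPerm (p q : Int → Bool) (h : ∀ x, p x = true → q x = false) :
    ∀ xs : List Int, (xs.filter (fun x => p x || q x)).Perm (xs.filter p ++ xs.filter q) := by
  intro xs
  induction xs with
  | nil => simp
  | cons a l ih =>
    by_cases hp : p a = true
    · have hq : q a = false := h a hp
      simpa [List.filter_cons, hp, hq] using ih.cons a
    · have hp' : p a = false := by simpa using hp
      by_cases hq : q a = true
      · simpa [List.filter_cons, hp', hq] using (ih.cons a).trans List.perm_middle.symm
      · have hq' : q a = false := by simpa using hq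
        simpa [List.filter_cons, hp', hq'] using ih

theorem pvSortedDecomp (xs : List Int) :
    PySem.List.sorted (xs.filter (fun t => decide (0 ≤ t) && decide (t ≤ 33))) (fun x => x) false =
      PySem.List.sorted (xs.filter (fun i => decide (0 ≤ i) && decide (i ≤ 8))) (fun x => x) false ++
      (PySem.List.sorted (xs.filter (fun i => decide (9 ≤ i) && decide (i ≤ 17))) (fun x => x) false ++
      (PySem.List.sorted (xs.filter (fun i => decide (18 ≤ i) && decide (i ≤ 26))) (fun x => x) false ++
       PySem.List.sorted (xs.filter (fun i => decide (27 ≤ i) && decide (i ≤ 33))) (fun x => x) false)) := by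
  have hdisj1 : ∀ x : Int, (decide (0 ≤ x) && decide (x ≤ 8)) = true →
      ((decide (9 ≤ x) && decide (x ≤ 17)) || ((decide (18 ≤ x) && decide (x ≤ 26)) || (decide (27 ≤ x) && decide (x ≤ 33)))) = false := by
    intro x hx
    simp only [Bool.and_eq_true, decide_eq_true_eq] at hx
    simp only [Bool.or_eq_false_iff, Bool.and_eq_false_iff, decide_eq_false_iff_not]
    omega
  have hdisj2 : ∀ x : Int, (decide (9 ≤ x) && decide (x ≤ 17)) = true →
      ((decide (18 ≤ x) && decide (x ≤ 26)) || (decide (27 ≤ x) && decide (x ≤ 33))) = false := by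
    intro x hx
    simp only [Bool.and_eq_true, decide_eq_true_eq] at hx
    simp only [Bool.or_eq_false_iff, Bool.and_eq_false_iff, decide_eq_false_iff_not]
    omega
  have hdisj3 : ∀ x : Int, (decide (18 ≤ x) && decide (x ≤ 26)) = true →
      (decide (27 ≤ x) && decide (x ≤ 33)) = false := by
    intro x hx
    simp only [Bool.and_eq_true, decide_eq_true_eq] at hx
    simp only [Bool.and_eq_false_iff, decide_eq_false_iff_not]
    omega
  have hbig : xs.filter (fun t => decide (0 ≤ t) && decide (t ≤ 33)) =
      xs.filter (fun x => (decide (0 ≤ x) && decide (x ≤ 8)) ||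
        ((decide (9 ≤ x) && decide (x ≤ 17)) || ((decide (18 ≤ x) && decide (x ≤ 26)) || (decide (27 ≤ x) && decide (x ≤ 33))))) := by
    apply List.filter_congr
    intro x _
    rw [Bool.eq_iff_iff]
    simp only [Bool.or_eq_true, Bool.and_eq_true, decide_eq_true_eq]
    omega
  have hchain : (xs.filter (fun t => decide (0 ≤ t) && decide (t ≤ 33))).Perm
      (xs.filter (fun i => decide (0 ≤ i) && decide (i ≤ 8)) ++
       (xs.filter (fun i => decide (9 ≤ i) && decide (i ≤ 17)) ++
        (xs.filter (fun i => decide (18 ≤ i) && decide (i ≤ 26)) ++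
         xs.filter (fun i => decide (27 ≤ i) && decide (i ≤ 33))))) := by
    rw [hbig]
    refine (pvFilterOrPerm _ _ hdisj1 xs).trans ?_
    refine List.Perm.append_left _ ?_
    refine (pvFilterOrPerm _ _ hdisj2 xs).trans ?_
    refine List.Perm.append_left _ ?_
    exact pvFilterOrPerm _ _ hdisj3 xs
  have hmem0 : ∀ t ∈ PySem.List.sorted (xs.filter (fun i => decide (0 ≤ i) && decide (i ≤ 8))) (fun x => x) false, 0 ≤ t ∧ t ≤ 8 := by
    intro t ht
    rw [PySem.List.mem_sorted] at ht
    have := List.of_mem_filter ht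
    simpa using this
  have hmem1 : ∀ t ∈ PySem.List.sorted (xs.filter (fun i => decide (9 ≤ i) && decide (i ≤ 17))) (fun x => x) false, 9 ≤ t ∧ t ≤ 17 := by
    intro t ht
    rw [PySem.List.mem_sorted] at ht
    have := List.of_mem_filter ht
    simpa using this
  have hmem2 : ∀ t ∈ PySem.List.sorted (xs.filter (fun i => decide (18 ≤ i) && decide (i ≤ 26))) (fun x => x) false, 18 ≤ t ∧ t ≤ 26 := by
    intro t ht
    rw [PySem.List.mem_sorted] at ht
    have := List.of_mem_filter ht
    simpa using this
  have hmem3 : ∀ t ∈ PySem.List.sorted (xs.filter (fun i => decide (27 ≤ i) && decide (i ≤ 33))) (fun x => x) false, 27 ≤ t ∧ t ≤ 33 := by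
    intro t ht
    rw [PySem.List.mem_sorted] at ht
    have := List.of_mem_filter ht
    simpa using this
  apply PySem.List.sorted_id_eq_of_perm_of_pairwise
  · refine List.Perm.trans ?_ hchain.symm
    exact List.Perm.append (PySem.List.sorted_perm _ _ _)
      (List.Perm.append (PySem.List.sorted_perm _ _ _)
        (List.Perm.append (PySem.List.sorted_perm _ _ _) (PySem.List.sorted_perm _ _ _)))
  · rw [List.pairwise_append]
    refine ⟨PySem.List.sorted_pairwise _ _, ?_, ?_⟩
    · rw [List.pairwise_append]
      refine ⟨PySem.List.sorted_pairwise _ _, ?_, ?_⟩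
      · rw [List.pairwise_append]
        refine ⟨PySem.List.sorted_pairwise _ _, PySem.List.sorted_pairwise _ _, ?_⟩
        intro a ha b hb
        have := hmem2 a ha; have := hmem3 b hb; omega
      · intro a ha b hb
        rw [List.mem_append] at hb
        have h1 := hmem1 a ha
        rcases hb with hb | hb
        · have := hmem2 b hb; omega
        · have := hmem3 b hb; omega
    · intro a ha b hb
      rw [List.mem_append, List.mem_append] at hb
      have h0 := hmem0 a ha
      rcases hb with hb | hb | hb
      · have := hmem1 b hb; omega
      · have := hmem2 b hb; omega
      · have := hmem3 b hb; omega

theorem pvLetter_zero : pvLetter 0 = "m" := by decide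
theorem pvLetter_one : pvLetter 1 = "p" := by decide
theorem pvLetter_two : pvLetter 2 = "s" := by decide
theorem pvLetter_three : pvLetter 3 = "z" := by decide

theorem pvMemSortedFilter (lo hi : Int) (xs : List Int) :
    ∀ t ∈ PySem.List.sorted (xs.filter (fun i => decide (lo ≤ i) && decide (i ≤ hi))) (fun x => x) false,
      lo ≤ t ∧ t ≤ hi := by
  intro t ht
  rw [PySem.List.mem_sorted] at ht
  have := List.of_mem_filter ht
  simpa using this

theorem pvDigitsM (l : List Int) (h : ∀ t ∈ l, 0 ≤ t ∧ t ≤ 8) :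
    PySem.Str.join "" (l.map (fun t => if t = 4 then "0" else PySem.Int.toStr (t + 1))) = pvDigits l := by
  unfold pvDigits
  congr 1
  apply List.map_congr_left
  intro t ht
  have hb := h t ht
  have h9 : PySem.Int.mod t 9 = t := by
    rw [PySem.Int.mod_eq_emod_of_pos (by norm_num)]; omega
  by_cases h4 : t = 4
  · rw [if_pos h4]
    simp only [pvDigit]
    rw [if_pos (by omega)]
  · have hno : ¬ (t = 4 ∨ t = 13 ∨ t = 22) := by omega
    rw [if_neg h4]
    simp only [pvDigit]
    rw [if_neg hno, h9]

theorem pvDigitsP (l : List Int) (h : ∀ t ∈ l, 9 ≤ t ∧ t ≤ 17) :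
    PySem.Str.join "" (l.map (fun t => if t = 13 then "0" else PySem.Int.toStr (t - 9 + 1))) = pvDigits l := by
  unfold pvDigits
  congr 1
  apply List.map_congr_left
  intro t ht
  have hb := h t ht
  have h9 : PySem.Int.mod t 9 = t - 9 := by
    rw [PySem.Int.mod_eq_emod_of_pos (by norm_num)]; omega
  by_cases h4 : t = 13
  · rw [if_pos h4]
    simp only [pvDigit]
    rw [if_pos (by omega)]
  · have hno : ¬ (t = 4 ∨ t = 13 ∨ t = 22) := by omega
    rw [if_neg h4]
    simp only [pvDigit]
    rw [if_neg hno, h9]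

theorem pvDigitsS (l : List Int) (h : ∀ t ∈ l, 18 ≤ t ∧ t ≤ 26) :
    PySem.Str.join "" (l.map (fun t => if t = 22 then "0" else PySem.Int.toStr (t - 18 + 1))) = pvDigits l := by
  unfold pvDigits
  congr 1
  apply List.map_congr_left
  intro t ht
  have hb := h t ht
  have h9 : PySem.Int.mod t 9 = t - 18 := by
    rw [PySem.Int.mod_eq_emod_of_pos (by norm_num)]; omega
  by_cases h4 : t = 22
  · rw [if_pos h4]
    simp only [pvDigit]
    rw [if_pos (by omega)]
  · have hno : ¬ (t = 4 ∨ t = 13 ∨ t = 22) := by omega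
    rw [if_neg h4]
    simp only [pvDigit]
    rw [if_neg hno, h9]

theorem pvDigitsH (l : List Int) (h : ∀ t ∈ l, 27 ≤ t ∧ t ≤ 33) :
    PySem.Str.join "" (l.map (fun t => PySem.Int.toStr (t - 27 + 1))) = pvDigits l := by
  unfold pvDigits
  congr 1
  apply List.map_congr_left
  intro t ht
  have hb := h t ht
  have h9 : PySem.Int.mod t 9 = t - 27 := by
    rw [PySem.Int.mod_eq_emod_of_pos (by norm_num)]; omega
  have hno : ¬ (t = 4 ∨ t = 13 ∨ t = 22) := by omega
  simp only [pvDigit]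
  rw [if_neg hno, h9]

-- ===== VERDICT (by name: the statement is the Claim_ definition above) =====
theorem format_tiles_for_display_spec : Claim_equal_format_tiles_for_display := by
  intro xs _
  unfold Spec_format_tiles_for_display
  by_cases hxs : xs = []
  · subst hxs; decide
  · simp only [format_tiles_for_display, format_tiles_for_display_alt, if_neg hxs]
    rw [pvSortedDecomp]
    set M := PySem.List.sorted (xs.filter (fun i => decide (0 ≤ i) && decide (i ≤ 8))) (fun x => x) false with hMdef
    set P := PySem.List.sorted (xs.filter (fun i => decide (9 ≤ i) && decide (i ≤ 17))) (fun x => x) false with hPdef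
    set S := PySem.List.sorted (xs.filter (fun i => decide (18 ≤ i) && decide (i ≤ 26))) (fun x => x) false with hSdef
    set H := PySem.List.sorted (xs.filter (fun i => decide (27 ≤ i) && decide (i ≤ 33))) (fun x => x) false with hHdef
    have hmM := pvMemSortedFilter 0 8 xs
    have hmP := pvMemSortedFilter 9 17 xs
    have hmS := pvMemSortedFilter 18 26 xs
    have hmH := pvMemSortedFilter 27 33 xs
    rw [← hMdef] at hmM
    rw [← hPdef] at hmP
    rw [← hSdef] at hmS
    rw [← hHdef] at hmH
    have hbM : ∀ t ∈ M, min (PySem.Int.floordiv t 9) 3 = 0 := by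
      intro t ht
      have := hmM t ht
      rw [PySem.Int.floordiv_eq_ediv_of_pos (by norm_num)]
      omega
    have hbP : ∀ t ∈ P, min (PySem.Int.floordiv t 9) 3 = 1 := by
      intro t ht
      have := hmP t ht
      rw [PySem.Int.floordiv_eq_ediv_of_pos (by norm_num)]
      omega
    have hbS : ∀ t ∈ S, min (PySem.Int.floordiv t 9) 3 = 2 := by
      intro t ht
      have := hmS t ht
      rw [PySem.Int.floordiv_eq_ediv_of_pos (by norm_num)]
      omega
    have hbH : ∀ t ∈ H, min (PySem.Int.floordiv t 9) 3 = 3 := by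
      intro t ht
      have := hmH t ht
      rw [PySem.Int.floordiv_eq_ediv_of_pos (by norm_num)]
      omega
    have hDM := pvDigitsM M hmM
    have hDP := pvDigitsP P hmP
    have hDS := pvDigitsS S hmS
    have hDH := pvDigitsH H hmH
    rw [List.foldl_append, List.foldl_append, List.foldl_append]
    rw [pvRunPart M 0 (-1) "" hbM (by norm_num)]
    rw [pvRunPart P 1 _ _ hbP (by split <;> norm_num)]
    rw [pvRunPart S 2 _ _ hbS (by split <;> [skip; norm_num] <;> split <;> norm_num)]
    rw [pvRunPart H 3 _ _ hbH (by split <;> [skip; norm_num] <;> split <;> [skip; norm_num] <;> split <;> norm_num)]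
    by_cases hm : M = [] <;> by_cases hp : P = [] <;> by_cases hs : S = [] <;> by_cases hz : H = [] <;>
      simp [hm, hp, hs, hz, hDM, hDP, hDS, hDH, pvClose,
        pvLetter_zero, pvLetter_one, pvLetter_two, pvLetter_three,
        String.append_assoc, String.empty_append, String.append_empty]
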